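-- pv_equiv track=rewrite | github.com/mykhailo-vavr/python_learn | programming/prog_2/prog_2.py | getMinNumFromMaxCol
-- ===== SOURCE A (Python) =====
-- def getMinNumFromMaxCol(A):
--     sum = 0
--     minNum = A[0][0]
--
--     for i in range(len(A)):
--         tempSum = 0
--         tempMinNum = A[0][i]
--         for j in range(len(A)):
--             tempMinNum = min(A[j][i], tempMinNum)
--             tempSum += abs(A[j][i])
--         if tempSum > sum:
--             sum = tempSum
--             minNum = tempMinNum
--
--     return minNum
-- ===== SOURCE B (Python) =====
-- def getMinNumFromMaxCol(A):
--     n = len(A)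
--     colsums = [sum(abs(A[j][i]) for j in range(n)) for i in range(n)]
--     imax = colsums.index(max(colsums))
--     return min(A[j][imax] for j in range(n))
-- ===== Notes on version B (the rewrite author's own statement) =====
-- stated objective: simpler
-- what changed: Replaces the single fused loop carrying running (sum, minNum) state with three declarative passes: build the list of column abs-sums, pick the first argmax with index(max(...)), then take min() of that column.
import Mathlib
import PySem

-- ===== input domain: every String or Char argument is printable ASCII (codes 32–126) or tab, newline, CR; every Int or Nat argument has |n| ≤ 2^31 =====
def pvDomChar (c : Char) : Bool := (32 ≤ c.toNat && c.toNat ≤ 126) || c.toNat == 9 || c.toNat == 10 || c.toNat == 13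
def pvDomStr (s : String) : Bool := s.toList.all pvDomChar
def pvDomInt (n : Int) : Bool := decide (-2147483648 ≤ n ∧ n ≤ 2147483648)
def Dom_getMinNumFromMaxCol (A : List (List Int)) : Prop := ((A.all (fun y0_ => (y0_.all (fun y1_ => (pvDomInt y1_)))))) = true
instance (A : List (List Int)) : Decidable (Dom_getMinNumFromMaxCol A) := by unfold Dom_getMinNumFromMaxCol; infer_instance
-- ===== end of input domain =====

-- B replaces A's fused loop carrying running (sum, minNum) state by three declarative
-- passes: list of column abs-sums, first argmax via index(max(...)), then min of that column.

-- shared element access A[j][i] (identical in both Pythons); default never used inside Pre_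
def pvAt (A : List (List Int)) (j i : Int) : Int :=
  PySem.List.pyGetD (PySem.List.pyGetD A j []) i 0

-- ===== PORT A =====
def getMinNumFromMaxCol (A : List (List Int)) : Int :=
  (((PySem.List.pyRange 0 (PySem.List.len A) 1).foldl
    (fun (st : Int × Int) i =>
      let inner := (PySem.List.pyRange 0 (PySem.List.len A) 1).foldl
        (fun (p : Int × Int) j => (min (pvAt A j i) p.1, p.2 + |pvAt A j i|))
        (pvAt A 0 i, 0)
      if inner.2 > st.1 then (inner.2, inner.1) else st)
    (0, pvAt A 0 0))).2

-- ===== PORT B =====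
def getMinNumFromMaxCol_alt (A : List (List Int)) : Int :=
  let n := PySem.List.len A
  let colsums := (PySem.List.pyRange 0 n 1).map (fun i =>
    (PySem.List.pyRange 0 n 1).foldl (fun s j => s + |pvAt A j i|) 0)
  let mx := (PySem.List.max? colsums (fun x => x)).getD 0
  let imax : Int := ((PySem.List.index? colsums mx).getD 0 : Nat)
  (PySem.List.min? ((PySem.List.pyRange 0 n 1).map (fun j => pvAt A j imax)) (fun x => x)).getD 0

-- ===== PRECONDITION & SPEC =====
-- Pre_ excludes exactly the inputs where Python A raises IndexError: the empty matrix,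
-- and matrices with some row shorter than the number of rows (A reads A[j][i] for i,j < len(A)).
def Pre_getMinNumFromMaxCol (A : List (List Int)) : Prop :=
  A ≠ [] ∧ ∀ row ∈ A, A.length ≤ row.length
instance (A : List (List Int)) : Decidable (Pre_getMinNumFromMaxCol A) := by
  unfold Pre_getMinNumFromMaxCol; infer_instance
def pvWitness_getMinNumFromMaxCol : List (List Int) := [[1, 2], [3, -4]]

def Spec_getMinNumFromMaxCol (A : List (List Int)) (out : Int) : Prop := out = getMinNumFromMaxCol_alt A
instance (A : List (List Int)) (out : Int) : Decidable (Spec_getMinNumFromMaxCol A out) := by unfold Spec_getMinNumFromMaxCol; infer_instance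

-- ===== CLAIM (what is proved, stated in full; the proofs are below) =====
def Claim_equal_getMinNumFromMaxCol : Prop := ∀ (A : List (List Int)), Dom_getMinNumFromMaxCol A → Pre_getMinNumFromMaxCol A → Spec_getMinNumFromMaxCol A (getMinNumFromMaxCol A)

-- ===== LEMMAS AND PROOFS =====

-- column abs-sum and A's running column minimum, as standalone functions
def pvG (A : List (List Int)) (i : Int) : Int :=
  (PySem.List.pyRange 0 (PySem.List.len A) 1).foldl (fun s j => s + |pvAt A j i|) 0
def pvM (A : List (List Int)) (i : Int) : Int :=
  (PySem.List.pyRange 0 (PySem.List.len A) 1).foldl (fun m j => min (pvAt A j i) m) (pvAt A 0 i)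

-- a fold over a pair with independent components splits
lemma pv_foldl_pair (f h : Int → Int → Int) :
    ∀ (l : List Int) (a b : Int),
      l.foldl (fun (p : Int × Int) x => (f p.1 x, h p.2 x)) (a, b) =
        (l.foldl f a, l.foldl h b) := by
  intro l
  induction l with
  | nil => intro a b; rfl
  | cons x t ih => intro a b; simp [List.foldl, ih]

lemma pv_foldl_add_map (f : Int → Int) :
    ∀ (l : List Int) (s : Int),
      l.foldl (fun s j => s + f j) s = s + (l.map f).sum := by
  intro l
  induction l with
  | nil => intro s; simp
  | cons x t ih => intro s; simp [List.foldl, ih]; ring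

lemma pv_foldl_min_map (vf : Int → Int) :
    ∀ (t : List Int) (x : Int),
      t.foldl (fun m j => min (vf j) m) x = (t.map vf).foldl min x := by
  intro t
  induction t with
  | nil => intro x; rfl
  | cons j t ih =>
      intro x
      simp only [List.foldl, List.map]
      rw [ih, min_comm]

lemma pv_foldl_stay (gf mf : Int → Int) :
    ∀ (l : List Int) (s mn : Int), (∀ x ∈ l, gf x ≤ s) →
      l.foldl (fun (st : Int × Int) i => if gf i > st.1 then (gf i, mf i) else st) (s, mn) = (s, mn) := by
  intro l
  induction l with
  | nil => intro s mn _; rfl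
  | cons i t ih =>
      intro s mn hb
      have h1 : ¬ gf i > s := not_lt.mpr (hb i (List.mem_cons_self))
      simp only [List.foldl, h1, if_false]
      exact ih s mn (fun x hx => hb x (List.mem_cons_of_mem _ hx))

lemma pv_foldl_argmax (gf mf : Int → Int) :
    ∀ (l : List Int) (k : Nat) (s mn M : Int),
      (∀ x ∈ l, gf x ≤ M) →
      PySem.List.index? (l.map gf) M = some k →
      s < M →
      l.foldl (fun (st : Int × Int) i => if gf i > st.1 then (gf i, mf i) else st) (s, mn) =
        (M, mf (l.getD k 0)) := by
  intro l
  induction l with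
  | nil => intro k s mn M _ hidx _; simp [PySem.List.index?] at hidx
  | cons i t ih =>
      intro k s mn M hb hidx hs
      by_cases hgi : gf i = M
      · have h0 : PySem.List.index? ((i :: t).map gf) M = some 0 := by
          simp only [List.map]
          rw [hgi]
          exact PySem.List.index?_cons_self M (t.map gf)
        rw [h0] at hidx
        have hk0 : k = 0 := by
          have := Option.some.inj hidx; omega
        subst hk0
        have hlt : gf i > s := by omega
        simp only [List.foldl, hlt, if_true, List.getD]
        rw [hgi]
        exact pv_foldl_stay gf mf t M (mf i)
          (fun x hx => hb x (List.mem_cons_of_mem _ hx))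
      · have hlt : gf i < M := lt_of_le_of_ne (hb i (List.mem_cons_self)) hgi
        have hne : gf i ≠ M := hgi
        have hstep : PySem.List.index? ((i :: t).map gf) M =
            (PySem.List.index? (t.map gf) M).map (· + 1) := by
          simp only [List.map]
          exact PySem.List.index?_cons_of_ne (t.map gf) hne
        rw [hstep] at hidx
        obtain ⟨k', hk', hkk⟩ : ∃ k', PySem.List.index? (t.map gf) M = some k' ∧ k = k' + 1 := by
          cases h : PySem.List.index? (t.map gf) M with
          | none => rw [h] at hidx; simp at hidx
          | some k' => rw [h] at hidx; simp at hidx; exact ⟨k', rfl, hidx.symm⟩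
        subst hkk
        have hb' : ∀ x ∈ t, gf x ≤ M := fun x hx => hb x (List.mem_cons_of_mem _ hx)
        simp only [List.foldl]
        by_cases hsi : gf i > s
        · simp only [hsi, if_true]
          have := ih k' (gf i) (mf i) M hb' hk' hlt
          simpa [List.getD] using this
        · simp only [hsi, if_false]
          have := ih k' s mn M hb' hk' hs
          simpa [List.getD] using this

lemma pv_foldl_min_zero (f : Int → Int) :
    ∀ (l : List Int), (∀ j ∈ l, f j = 0) →
      l.foldl (fun m j => min (f j) m) 0 = 0 := by
  intro l
  induction l with
  | nil => intro _; rfl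
  | cons j t ih =>
      intro h
      simp only [List.foldl, h j (List.mem_cons_self), min_self]
      exact ih (fun x hx => h x (List.mem_cons_of_mem _ hx))

lemma pvG_nonneg (A : List (List Int)) (i : Int) : 0 ≤ pvG A i := by
  unfold pvG
  rw [pv_foldl_add_map]
  have : 0 ≤ ((PySem.List.pyRange 0 (PySem.List.len A) 1).map (fun j => |pvAt A j i|)).sum :=
    List.sum_nonneg (by intro x hx; simp at hx; obtain ⟨j, _, rfl⟩ := hx; exact abs_nonneg _)
  omega

lemma pvG_zero_entries (A : List (List Int)) (i : Int) (h : pvG A i = 0) :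
    ∀ j ∈ PySem.List.pyRange 0 (PySem.List.len A) 1, pvAt A j i = 0 := by
  intro j hj
  unfold pvG at h
  rw [pv_foldl_add_map] at h
  have hmem : |pvAt A j i| ∈ (PySem.List.pyRange 0 (PySem.List.len A) 1).map (fun j => |pvAt A j i|) :=
    List.mem_map_of_mem hj
  have hle : |pvAt A j i| ≤ ((PySem.List.pyRange 0 (PySem.List.len A) 1).map (fun j => |pvAt A j i|)).sum :=
    List.single_le_sum (by intro x hx; simp at hx; obtain ⟨j', _, rfl⟩ := hx; exact abs_nonneg _) _ hmem
  have : |pvAt A j i| = 0 := le_antisymm (by omega) (abs_nonneg _)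
  exact abs_eq_zero.mp this

-- B's min-of-column equals A's running column minimum pvM
lemma pv_colmin_eq (A : List (List Int)) (h0 : (0 : Int) < PySem.List.len A) (i : Int) :
    (PySem.List.min? ((PySem.List.pyRange 0 (PySem.List.len A) 1).map (fun j => pvAt A j i))
        (fun x => x)).getD 0 = pvM A i := by
  rw [PySem.List.pyRange_one_cons h0]
  simp only [List.map, PySem.List.min?_id_cons, Option.getD_some]
  unfold pvM
  rw [PySem.List.pyRange_one_cons h0]
  simp only [List.foldl, min_self]
  exact (pv_foldl_min_map (fun j => pvAt A j i) _ _).symm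

-- ===== VERDICT (by name: the statement is the Claim_ definition above) =====
theorem getMinNumFromMaxCol_spec : Claim_equal_getMinNumFromMaxCol := by
  intro A _ hPre
  obtain ⟨hne, _⟩ := hPre
  have h0 : (0 : Int) < PySem.List.len A := by
    simp [PySem.List.len_eq]
    exact List.length_pos_iff.mpr hne
  unfold Spec_getMinNumFromMaxCol
  have hstepeq : (fun (st : Int × Int) i =>
      let inner := (PySem.List.pyRange 0 (PySem.List.len A) 1).foldl
        (fun (p : Int × Int) j => (min (pvAt A j i) p.1, p.2 + |pvAt A j i|))
        (pvAt A 0 i, 0)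
      if inner.2 > st.1 then (inner.2, inner.1) else st)
      = (fun (st : Int × Int) i => if pvG A i > st.1 then (pvG A i, pvM A i) else st) := by
    funext st i
    have hX : (PySem.List.pyRange 0 (PySem.List.len A) 1).foldl
        (fun (p : Int × Int) j => (min (pvAt A j i) p.1, p.2 + |pvAt A j i|))
        (pvAt A 0 i, 0) = (pvM A i, pvG A i) :=
      pv_foldl_pair (fun m j => min (pvAt A j i) m) (fun s j => s + |pvAt A j i|)
        (PySem.List.pyRange 0 (PySem.List.len A) 1) (pvAt A 0 i) 0
    simp only [hX]
  have hA : getMinNumFromMaxCol A =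
      ((PySem.List.pyRange 0 (PySem.List.len A) 1).foldl
        (fun (st : Int × Int) i => if pvG A i > st.1 then (pvG A i, pvM A i) else st)
        (0, pvAt A 0 0)).2 := by
    unfold getMinNumFromMaxCol
    rw [hstepeq]
  set L := PySem.List.pyRange 0 (PySem.List.len A) 1 with hL
  have hB : getMinNumFromMaxCol_alt A =
      (PySem.List.min? (L.map (fun j => pvAt A j
          (((PySem.List.index? (L.map (pvG A))
            ((PySem.List.max? (L.map (pvG A)) (fun x => x)).getD 0)).getD 0 : Nat) : Int)))
        (fun x => x)).getD 0 := rfl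
  rw [hA, hB]
  -- B's max and argmax
  have hcne : L.map (pvG A) ≠ [] := by
    rw [hL, PySem.List.pyRange_one_cons h0]; simp
  obtain ⟨mx, hmx⟩ : ∃ mx, PySem.List.max? (L.map (pvG A)) (fun x => x) = some mx := by
    cases h : PySem.List.max? (L.map (pvG A)) (fun x => x) with
    | none => exact absurd (PySem.List.max?_eq_none_iff _ _ |>.mp h) hcne
    | some mx => exact ⟨mx, rfl⟩
  have hmxmem : mx ∈ L.map (pvG A) := PySem.List.max?_mem hmx
  obtain ⟨kidx, hk⟩ : ∃ k, PySem.List.index? (L.map (pvG A)) mx = some k := by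
    cases h : PySem.List.index? (L.map (pvG A)) mx with
    | none => exact absurd (PySem.List.index?_eq_none_iff _ _ |>.mp h) (by simp [hmxmem])
    | some k => exact ⟨k, rfl⟩
  rw [hmx]
  simp only [Option.getD_some]
  rw [hk]
  simp only [Option.getD_some]
  -- bounds and index facts
  have hub : ∀ x ∈ L, pvG A x ≤ mx := by
    intro x hx
    exact PySem.List.max?_isMax hmx _ (List.mem_map_of_mem hx)
  obtain ⟨hklt, hkeq, _⟩ := PySem.List.getElem_of_index?_eq_some hk
  have hkltL : kidx < L.length := by simpa using hklt
  have hLk : L[kidx]'hkltL = (kidx : Int) := by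
    simp only [hL]
    rw [PySem.List.getElem_pyRange_one]
    simp
  have hLget : L.getD kidx 0 = (kidx : Int) := by
    rw [List.getD_eq_getElem _ _ hkltL, hLk]
  have hkmem : (kidx : Int) ∈ L := by
    rw [hL, PySem.List.mem_pyRange_one]
    constructor
    · exact Int.natCast_nonneg _
    · have : kidx < (PySem.List.len A - 0).toNat := by
        simpa [hL, PySem.List.length_pyRange_one] using hkltL
      omega
  have hgk : pvG A (kidx : Int) = mx := by
    have h1 : (L.map (pvG A))[kidx]'hklt = pvG A (L[kidx]'hkltL) := by simp
    rw [← hkeq, h1, hLk]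
  -- B's value is pvM A kidx
  rw [pv_colmin_eq A h0 (kidx : Int)]
  -- nonnegativity of mx
  have hmx0 : 0 ≤ mx := hgk ▸ pvG_nonneg A (kidx : Int)
  rcases lt_or_eq_of_le hmx0 with hpos | hzero
  · -- positive max: A keeps the first argmax column
    rw [pv_foldl_argmax (pvG A) (pvM A) L kidx 0 (pvAt A 0 0) mx hub hk hpos]
    rw [hLget]
  · -- all column sums are zero: every accessed entry is zero, both sides return 0
    have hallz : ∀ x ∈ L, pvG A x = 0 := by
      intro x hx
      have h1 := hub x hx
      have h2 := pvG_nonneg A x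
      omega
    have h0mem : (0 : Int) ∈ L := by
      rw [hL, PySem.List.mem_pyRange_one]; omega
    have hz00 : pvAt A 0 0 = 0 := pvG_zero_entries A 0 (hallz 0 h0mem) 0 h0mem
    have hstay : L.foldl (fun (st : Int × Int) i => if pvG A i > st.1 then (pvG A i, pvM A i) else st)
        (0, pvAt A 0 0) = (0, pvAt A 0 0) := by
      apply pv_foldl_stay
      intro x hx; rw [hallz x hx]
    rw [hstay]
    have hzk : ∀ j ∈ L, pvAt A j (kidx : Int) = 0 :=
      pvG_zero_entries A (kidx : Int) (hallz _ hkmem)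
    have hMk : pvM A (kidx : Int) = 0 := by
      unfold pvM
      rw [← hL, hzk 0 h0mem]
      exact pv_foldl_min_zero _ L hzk
    simp [hMk, hz00]
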